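-- pv_equiv track=rewrite | github.com/langchain-ai/langchain | libs/experimental/langchain_experimental/got/examples/sorting/utils.py | num_errors
-- ===== SOURCE A (Python) =====
-- from typing import Dict, List
--
-- def string_to_list(string: str) -> List[int]:
--     """
--     Helper function to convert a list encoded inside a string into a Python
--     list object of string elements.
--
--     :param string: Input string containing a list.
--     :type string: str
--     :return: List of string elements.
--     :rtype: List[str]
--     :raise AssertionError: If input string does not contain a list.
--     """
--
--     assert string[0] == "[" and string[-1] == "]", "String is not a list."
--     return [int(num) for num in string[1:-1].split(",")]
--
-- def num_errors(state: Dict) -> float: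
--     """
--     Function to locally count the number of errors that serves as a score.
--
--     :param state: Thought state to be scored.
--     :type state: Dict
--     :return: Number of errors.
--     :rtype: float
--     """
--
--     try:
--         unsorted_list = state["original"]
--         if (
--             "unsorted_sublist" in state
--             and state["unsorted_sublist"] != ""
--             and state["unsorted_sublist"] is not None
--             and len(state["unsorted_sublist"]) < len(unsorted_list) - 5
--         ):
--             unsorted_list = state["unsorted_sublist"]
--         correct_list = sorted(string_to_list(unsorted_list))
--         current_list = string_to_list(state["current"])
--         num_errors = 0
--         for i in range(10):
--             num_errors += abs(
--                 sum([1 for num in current_list if num == i])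
--                 - sum([1 for num in correct_list if num == i])
--             )
--         num_errors += sum(
--             [1 for num1, num2 in zip(current_list, current_list[1:]) if num1 > num2]
--         )
--         return num_errors
--     except:
--         return 300
-- ===== SOURCE B (Python) =====
-- from typing import Dict, List
--
--
-- def string_to_list(string: str) -> List[int]:
--     assert string[0] == "[" and string[-1] == "]", "String is not a list."
--     return [int(num) for num in string[1:-1].split(",")]
--
--
-- def num_errors(state: Dict) -> float:
--     # B: no sort and no per-digit histograms.  The digit-count mismatch is the
--     # size of the multiset symmetric difference restricted to values 0..9, so we
--     # greedily MATCH each digit of the current list against a pool of the source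
--     # digits; one fused pass over current also counts adjacent descents with a
--     # running `prev`.  Unmatched current digits + leftover pool + descents.
--     try:
--         unsorted_list = state["original"]
--         if (
--             "unsorted_sublist" in state
--             and state["unsorted_sublist"] != ""
--             and state["unsorted_sublist"] is not None
--             and len(state["unsorted_sublist"]) < len(unsorted_list) - 5
--         ):
--             unsorted_list = state["unsorted_sublist"]
--         pool = [v for v in string_to_list(unsorted_list) if 0 <= v <= 9]
--         errors = 0
--         prev = None
--         for v in string_to_list(state["current"]):
--             if prev is not None and prev > v:
--                 errors += 1
--             prev = v
--             if 0 <= v <= 9: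
--                 if v in pool:
--                     pool.remove(v)
--                 else:
--                     errors += 1
--         return errors + len(pool)
--     except:
--         return 300
-- ===== Notes on version B (the rewrite author's own statement) =====
-- stated objective: alternative
-- what changed: B replaces A's sort + ten per-digit rescans + zip pass by a greedy multiset-matching algorithm: it keeps a pool of the source's digits and, in one fused pass over the current list, matches each digit against the pool (removing it) or counts it as unmatched while tracking the previous element for descents; the score is unmatched + leftover pool + descents, equal to A's per-digit |count difference| sum plus inversions.
import Mathlib
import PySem

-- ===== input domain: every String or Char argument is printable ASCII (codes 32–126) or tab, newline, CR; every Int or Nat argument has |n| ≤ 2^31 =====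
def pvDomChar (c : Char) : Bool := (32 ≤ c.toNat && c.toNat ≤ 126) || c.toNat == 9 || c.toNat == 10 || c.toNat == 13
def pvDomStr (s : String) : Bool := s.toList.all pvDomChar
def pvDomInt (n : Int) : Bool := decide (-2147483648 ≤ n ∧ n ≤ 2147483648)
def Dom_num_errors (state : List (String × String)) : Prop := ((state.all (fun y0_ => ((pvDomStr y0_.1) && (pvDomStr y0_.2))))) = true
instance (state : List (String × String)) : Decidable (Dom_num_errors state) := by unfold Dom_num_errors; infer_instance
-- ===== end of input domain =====

-- B replaces A's sort + ten per-digit rescans + zip pass by one greedy multiset-matching pass; same value everywhere (A is total via its bare except).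

-- ===== PORT A =====
-- helper string_to_list (textually identical in Source A and Source B): none = the exception the bare except catches
def stringToList (s : String) : Option (List Int) :=
  match PySem.Str.pyGet? s 0, PySem.Str.pyGet? s (-1) with
  | some c0, some c1 =>
      if c0 = '[' ∧ c1 = ']' then
        (PySem.Chars.splitOn (PySem.Str.slice s (some 1) (some (-1))).toList [','] ).mapM PySem.Int.ofChars?
      else none
  | _, _ => none

def num_errors (state : List (String × String)) : Int :=
  let d := PySem.Dict.mk state
  let r : Option Int :=
    match d.get? "original" with
    | none => none
    | some orig0 =>
      let unsorted_list :=
        match d.get? "unsorted_sublist" with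
        | some sub =>
            if sub ≠ "" ∧ (PySem.Str.len sub : Int) < (PySem.Str.len orig0 : Int) - 5
            then sub else orig0
        | none => orig0
      match stringToList unsorted_list with
      | none => none
      | some src =>
        let correct_list := PySem.List.sorted src (fun x => x) false
        match d.get? "current" with
        | none => none
        | some curs =>
          match stringToList curs with
          | none => none
          | some current_list =>
            let base := (PySem.List.pyRange 0 10 1).foldl (fun acc i =>
              acc + |((current_list.filter (fun num => num == i)).map (fun _ => (1:Int))).sum
                     - ((correct_list.filter (fun num => num == i)).map (fun _ => (1:Int))).sum|) 0
            some (base + (((current_list.zip (PySem.List.slice current_list (some 1) none)).filter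
                    (fun p => decide (p.1 > p.2))).map (fun _ => (1:Int))).sum)
  match r with
  | some v => v
  | none => 300

-- ===== PORT B =====
-- the body of Source B's fused loop: descent check with prev, then greedy matching against the pool
def bStep (st : Int × List Int × Option Int) (v : Int) : Int × List Int × Option Int :=
  let e := st.1 + (match st.2.2 with | some p => if p > v then (1:Int) else 0 | none => 0)
  if 0 ≤ v ∧ v ≤ 9 then
    if v ∈ st.2.1 then (e, st.2.1.erase v, some v) else (e + 1, st.2.1, some v)
  else (e, st.2.1, some v)

def num_errors_alt (state : List (String × String)) : Int :=
  let d := PySem.Dict.mk state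
  let r : Option Int :=
    match d.get? "original" with
    | none => none
    | some orig0 =>
      let unsorted_list :=
        match d.get? "unsorted_sublist" with
        | some sub =>
            if sub ≠ "" ∧ (PySem.Str.len sub : Int) < (PySem.Str.len orig0 : Int) - 5
            then sub else orig0
        | none => orig0
      match stringToList unsorted_list with
      | none => none
      | some src =>
        let pool := src.filter (fun v => decide (0 ≤ v) && decide (v ≤ 9))
        match d.get? "current" with
        | none => none
        | some curs =>
          match stringToList curs with
          | none => none
          | some current_list =>
            let fin := current_list.foldl bStep (0, pool, none)
            some (fin.1 + (fin.2.1.length : Int))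
  match r with
  | some v => v
  | none => 300

-- ===== PRECONDITION & SPEC =====
def Spec_num_errors (state : List (String × String)) (out : Int) : Prop := out = num_errors_alt state
instance (state : List (String × String)) (out : Int) : Decidable (Spec_num_errors state out) := by unfold Spec_num_errors; infer_instance

-- ===== CLAIM (what is proved, stated in full; the proofs are below) =====
def Claim_equal_num_errors : Prop := ∀ (state : List (String × String)), Dom_num_errors state → Spec_num_errors state (num_errors state)

-- ===== LEMMAS AND PROOFS =====

-- proof-only recursive characterisations of B's fold state
def descF : Option Int → List Int → Int
  | _, [] => 0
  | prev, v :: t => (match prev with | some p => if p > v then (1:Int) else 0 | none => 0) + descF (some v) t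

def unm : List Int → List Int → Int
  | [], _ => 0
  | v :: t, pool =>
      if 0 ≤ v ∧ v ≤ 9 then
        (if v ∈ pool then unm t (pool.erase v) else 1 + unm t pool)
      else unm t pool

def leftover : List Int → List Int → List Int
  | [], pool => pool
  | v :: t, pool =>
      if 0 ≤ v ∧ v ≤ 9 then
        (if v ∈ pool then leftover t (pool.erase v) else leftover t pool)
      else leftover t pool

def lastOf : Option Int → List Int → Option Int
  | p, [] => p
  | _, v :: t => lastOf (some v) t

-- L1: the fused fold separates into descents + matching
lemma foldl_bStep_eq (l : List Int) (e : Int) (pool : List Int) (prev : Option Int) :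
    l.foldl bStep (e, pool, prev)
      = (e + descF prev l + unm l pool, leftover l pool, lastOf prev l) := by
  induction l generalizing e pool prev with
  | nil => simp [descF, unm, leftover, lastOf]
  | cons v t ih =>
    simp only [List.foldl_cons, bStep]
    by_cases hd : 0 ≤ v ∧ v ≤ 9
    · by_cases hm : v ∈ pool
      · simp only [if_pos hd, if_pos hm, ih, descF, unm, leftover, lastOf]
        refine Prod.ext ?_ rfl
        simp; ring
      · simp only [if_pos hd, if_neg hm, ih, descF, unm, leftover, lastOf]
        refine Prod.ext ?_ rfl
        simp; ring
    · simp only [if_neg hd, ih, descF, unm, leftover, lastOf]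
      refine Prod.ext ?_ rfl
      simp; ring

-- L2: descents = A's zip-pair count
lemma descF_some (a : Int) (t : List Int) :
    descF (some a) t
      = (((a :: t).zip t).filter (fun p => decide (p.1 > p.2))).length := by
  induction t generalizing a with
  | nil => simp [descF]
  | cons b t' ih =>
    simp only [descF, List.zip_cons_cons, List.filter_cons, ih b]
    by_cases h : a > b
    · simp [h]; ring
    · simp [h]

lemma descF_none (l : List Int) :
    descF none l = ((l.zip l.tail).filter (fun p => decide (p.1 > p.2))).length := by
  cases l with
  | nil => simp [descF]
  | cons a t => simpa [descF] using descF_some a t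

-- per-i indicator sum over range(10)
lemma pyRange10 : PySem.List.pyRange 0 10 1 = [0,1,2,3,4,5,6,7,8,9] := by
  rw [PySem.List.pyRange_one_cons (by norm_num), PySem.List.pyRange_one_cons (by norm_num),
      PySem.List.pyRange_one_cons (by norm_num), PySem.List.pyRange_one_cons (by norm_num),
      PySem.List.pyRange_one_cons (by norm_num), PySem.List.pyRange_one_cons (by norm_num),
      PySem.List.pyRange_one_cons (by norm_num), PySem.List.pyRange_one_cons (by norm_num),
      PySem.List.pyRange_one_cons (by norm_num), PySem.List.pyRange_one_cons (by norm_num),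
      PySem.List.pyRange_one_eq_nil (by norm_num)]
  norm_num

lemma sum_indicator_range10 (v : Int) :
    ((PySem.List.pyRange 0 10 1).map (fun i => if i = v then (1:Int) else 0)).sum
      = if 0 ≤ v ∧ v ≤ 9 then 1 else 0 := by
  rw [pyRange10]
  simp only [List.map_cons, List.map_nil, List.sum_cons, List.sum_nil]
  by_cases hd : 0 ≤ v ∧ v ≤ 9
  · rw [if_pos hd]
    obtain ⟨h1, h2⟩ := hd
    interval_cases v <;> norm_num
  · have hk : ∀ k : Int, 0 ≤ k → k ≤ 9 → ((if k = v then (1:Int) else 0) = 0) := by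
      intro k hk1 hk2
      rw [if_neg]
      intro he
      exact hd ⟨he ▸ hk1, he ▸ hk2⟩
    rw [if_neg hd, hk 0 (by norm_num) (by norm_num), hk 1 (by norm_num) (by norm_num),
        hk 2 (by norm_num) (by norm_num), hk 3 (by norm_num) (by norm_num),
        hk 4 (by norm_num) (by norm_num), hk 5 (by norm_num) (by norm_num),
        hk 6 (by norm_num) (by norm_num), hk 7 (by norm_num) (by norm_num),
        hk 8 (by norm_num) (by norm_num), hk 9 (by norm_num) (by norm_num)]
    norm_num

lemma sum_map_add' (l : List Int) (f g : Int → Int) :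
    (l.map (fun i => f i + g i)).sum = (l.map f).sum + (l.map g).sum := by
  induction l with
  | nil => simp
  | cons a t ih => simp [ih]; ring

-- L4: a pool of digits is fully counted by range(10)
lemma sum_count_range10 (pool : List Int) (hp : ∀ v ∈ pool, 0 ≤ v ∧ v ≤ 9) :
    ((PySem.List.pyRange 0 10 1).map (fun i => (pool.count i : Int))).sum
      = (pool.length : Int) := by
  induction pool with
  | nil => simp
  | cons v t ih =>
    have hv := hp v (by simp)
    have ht := ih (fun x hx => hp x (by simp [hx]))
    have : (fun i => ((v :: t).count i : Int))
         = (fun i => (t.count i : Int) + (if i = v then (1:Int) else 0)) := by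
      funext i
      by_cases h : i = v
      · subst h; rw [List.count_cons_self]; simp
      · rw [List.count_cons_of_ne (Ne.symm h)]; simp [h]
    rw [this, sum_map_add' _ _ _, ht, sum_indicator_range10, if_pos hv, List.length_cons]
    push_cast
    ring

-- L3: greedy matching computes the per-digit |count difference| sum
lemma match_eq_hist (l : List Int) (pool : List Int) (hp : ∀ v ∈ pool, 0 ≤ v ∧ v ≤ 9) :
    unm l pool + ((leftover l pool).length : Int)
      = ((PySem.List.pyRange 0 10 1).map
          (fun i => |(l.count i : Int) - (pool.count i : Int)|)).sum := by
  induction l generalizing pool with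
  | nil =>
    have hfe : (fun i => |((List.nil.count i : ℕ) : Int) - (pool.count i : Int)|)
        = (fun i => ((pool.count i : ℕ) : Int)) := by
      funext i
      simp [List.count_nil]
    simp only [unm, leftover]
    rw [hfe, sum_count_range10 pool hp]
    omega
  | cons v t ih =>
    by_cases hd : 0 ≤ v ∧ v ≤ 9
    · by_cases hm : v ∈ pool
      · have hp' : ∀ x ∈ pool.erase v, 0 ≤ x ∧ x ≤ 9 :=
          fun x hx => hp x (List.mem_of_mem_erase hx)
        have hcv : 0 < pool.count v := List.count_pos_iff.mpr hm
        rw [show unm (v :: t) pool = unm t (pool.erase v) by simp [unm, hd, hm],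
            show leftover (v :: t) pool = leftover t (pool.erase v) by simp [leftover, hd, hm],
            ih _ hp']
        apply congrArg
        apply List.map_congr_left
        intro i _
        apply congrArg
        by_cases h : i = v
        · subst h
          rw [List.count_cons_self, List.count_erase]
          simp only [BEq.rfl, if_true]
          omega
        · rw [List.count_cons_of_ne (Ne.symm h), List.count_erase_of_ne h]
      · have h0 : pool.count v = 0 := List.count_eq_zero.mpr hm
        rw [show unm (v :: t) pool = 1 + unm t pool by simp [unm, hd, hm],
            show leftover (v :: t) pool = leftover t pool by simp [leftover, hd, hm]]
        have hpt : (fun i => |(((v :: t).count i : ℕ) : Int) - (pool.count i : Int)|)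
             = (fun i => |((t.count i : ℕ) : Int) - (pool.count i : Int)| + (if i = v then (1:Int) else 0)) := by
          funext i
          by_cases h : i = v
          · subst h
            rw [List.count_cons_self, h0, if_pos rfl]
            push_cast
            rw [sub_zero, sub_zero, abs_of_nonneg (by positivity), abs_of_nonneg (by positivity)]
          · rw [List.count_cons_of_ne (Ne.symm h), if_neg h, add_zero]
        rw [hpt, sum_map_add' _ _ _, sum_indicator_range10, if_pos hd, ← ih pool hp]
        ring
    · rw [show unm (v :: t) pool = unm t pool by simp [unm, hd],
          show leftover (v :: t) pool = leftover t pool by simp [leftover, hd],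
          ih pool hp]
      apply congrArg
      apply List.map_congr_left
      intro i hi
      have hib : 0 ≤ i ∧ i < 10 := by
        simpa using (PySem.List.mem_pyRange_one).mp hi
      have hne : v ≠ i := by rintro rfl; exact hd ⟨hib.1, by omega⟩
      rw [List.count_cons_of_ne hne]

-- A's 0/1-comprehension sum over a filter is a count
lemma sum_one_filter_eq_count (l : List Int) (i : Int) :
    ((l.filter (fun num => num == i)).map (fun _ => (1:Int))).sum = (l.count i : Int) := by
  rw [PySem.List.sum_map_const_int]
  simp [List.count, List.countP_eq_length_filter]

-- the whole inner computation agrees, given the two parsed lists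
lemma body_eq (src current : List Int) :
    (PySem.List.pyRange 0 10 1).foldl (fun acc i =>
        acc + |((current.filter (fun num => num == i)).map (fun _ => (1:Int))).sum
             - (((PySem.List.sorted src (fun x => x) false).filter (fun num => num == i)).map (fun _ => (1:Int))).sum|) 0
      + (((current.zip (PySem.List.slice current (some 1) none)).filter
            (fun p => decide (p.1 > p.2))).map (fun _ => (1:Int))).sum
    = (current.foldl bStep (0, src.filter (fun v => decide (0 ≤ v) && decide (v ≤ 9)), none)).1
      + (((current.foldl bStep (0, src.filter (fun v => decide (0 ≤ v) && decide (v ≤ 9)), none)).2.1.length : ℕ) : Int) := by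
  set pool := src.filter (fun v => decide (0 ≤ v) && decide (v ≤ 9)) with hpool
  have hp : ∀ v ∈ pool, 0 ≤ v ∧ v ≤ 9 := by
    intro v hv
    rw [hpool] at hv
    have := List.of_mem_filter hv
    simpa using this
  rw [foldl_bStep_eq, PySem.List.foldl_add, PySem.List.sum_map_const_int]
  simp only [zero_add]
  rw [descF_none]
  have hterm : ∀ i ∈ PySem.List.pyRange 0 10 1,
      |((current.filter (fun num => num == i)).map (fun _ => (1:Int))).sum
        - (((PySem.List.sorted src (fun x => x) false).filter (fun num => num == i)).map (fun _ => (1:Int))).sum|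
      = |(current.count i : Int) - (pool.count i : Int)| := by
    intro i hi
    have hib : 0 ≤ i ∧ i < 10 := by simpa using (PySem.List.mem_pyRange_one).mp hi
    rw [sum_one_filter_eq_count, sum_one_filter_eq_count,
        (PySem.List.sorted_perm src (fun x => x) false).count_eq]
    have : pool.count i = src.count i := by
      rw [hpool]
      exact List.count_filter (by simp; omega)
    rw [this]
  rw [List.map_congr_left hterm, ← match_eq_hist current pool hp,
      PySem.List.slice_from_one]
  ring

-- ===== VERDICT (by name: the statement is the Claim_ definition above) =====
theorem num_errors_spec : Claim_equal_num_errors := by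
  intro state _
  show num_errors state = num_errors_alt state
  unfold num_errors num_errors_alt
  simp only []
  cases h1 : (PySem.Dict.mk state).get? "original" with
  | none => rfl
  | some orig0 =>
    cases h2 : (PySem.Dict.mk state).get? "unsorted_sublist" with
    | none =>
      dsimp only
      cases h3 : stringToList orig0 with
      | none => rfl
      | some src =>
        dsimp only
        cases h4 : (PySem.Dict.mk state).get? "current" with
        | none => rfl
        | some curs =>
          dsimp only
          cases h5 : stringToList curs with
          | none => rfl
          | some current => exact body_eq src current
    | some sub =>
      dsimp only
      by_cases hc : sub ≠ "" ∧ (PySem.Str.len sub : Int) < (PySem.Str.len orig0 : Int) - 5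
      · simp only [if_pos hc]
        cases h3 : stringToList sub with
        | none => rfl
        | some src =>
          dsimp only
          cases h4 : (PySem.Dict.mk state).get? "current" with
          | none => rfl
          | some curs =>
            dsimp only
            cases h5 : stringToList curs with
            | none => rfl
            | some current => exact body_eq src current
      · simp only [if_neg hc]
        cases h3 : stringToList orig0 with
        | none => rfl
        | some src =>
          dsimp only
          cases h4 : (PySem.Dict.mk state).get? "current" with
          | none => rfl
          | some curs =>
            dsimp only
            cases h5 : stringToList curs with
            | none => rfl
            | some current => exact body_eq src current
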